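-- pv_equiv track=rewrite | github.com/afei26579/locla_llm_manager | core/model_manager.py | _get_default_quantization
-- ===== SOURCE A (Python) =====
-- def _get_default_quantization(quantizations):
--     if not quantizations:
--         return 'Q4_K_M'
--     preferred = ['Q4_K_M', 'q4_K_M', 'Q4_0', 'q4_0', 'Q5_K_M', 'q5_K_M', 'Q8_0', 'q8_0']
--     for pref in preferred:
--         for q in quantizations:
--             if q.lower() == pref.lower():
--                 return q
--     return quantizations[0]
-- ===== SOURCE B (Python) =====
-- def _get_default_quantization(quantizations):
--     if not quantizations:
--         return 'Q4_K_M'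
--     priority = {'q4_k_m': 0, 'q4_0': 1, 'q5_k_m': 2, 'q8_0': 3}
--     best = None
--     best_p = 4
--     for q in quantizations:
--         p = priority.get(q.lower())
--         if p is None:
--             continue
--         if p == 0:
--             return q
--         if p < best_p:
--             best_p = p
--             best = q
--     return best if best is not None else quantizations[0]
-- ===== Notes on version B (the rewrite author's own statement) =====
-- stated objective: faster
-- what changed: Replaces A's 8x nested rescan of the list with one dict lookup table and a single pass that tracks the lowest-priority match (first wins ties, early return on priority 0).
import Mathlib
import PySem

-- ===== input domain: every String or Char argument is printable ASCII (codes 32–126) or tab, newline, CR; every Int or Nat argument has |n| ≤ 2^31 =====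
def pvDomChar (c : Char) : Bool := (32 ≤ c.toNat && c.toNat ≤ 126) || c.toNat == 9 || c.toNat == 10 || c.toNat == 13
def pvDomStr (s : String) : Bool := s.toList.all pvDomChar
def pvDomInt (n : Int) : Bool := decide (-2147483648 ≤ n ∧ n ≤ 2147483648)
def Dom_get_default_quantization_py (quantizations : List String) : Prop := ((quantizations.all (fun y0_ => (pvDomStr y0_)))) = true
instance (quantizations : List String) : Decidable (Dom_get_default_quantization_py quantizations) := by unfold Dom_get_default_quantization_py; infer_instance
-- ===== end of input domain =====

-- B replaces A's eight repeated scans of the list with one priority table and a single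
-- tracking pass (objective: faster by a constant factor).

-- ===== PORT A =====
-- inner 'for q in quantizations' loop of A
def aInner : List String → String → Option String
  | [], _ => none
  | q :: rest, pref =>
    if PySem.Str.lower q = PySem.Str.lower pref then some q else aInner rest pref

-- outer 'for pref in preferred' loop of A
def aOuter : List String → List String → Option String
  | [], _ => none
  | p :: ps, qs =>
    match aInner qs p with
    | some q => some q
    | none => aOuter ps qs

def get_default_quantization_py (quantizations : List String) : String :=
  match quantizations with
  | [] => "Q4_K_M"
  | q0 :: rest =>
    match aOuter ["Q4_K_M", "q4_K_M", "Q4_0", "q4_0", "Q5_K_M", "q5_K_M", "Q8_0", "q8_0"]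
        (q0 :: rest) with
    | some q => q
    | none => q0

-- ===== PORT B =====
def bPriority : PySem.Dict String Int :=
  PySem.Dict.ofList [("q4_k_m", 0), ("q4_0", 1), ("q5_k_m", 2), ("q8_0", 3)]

-- B's single pass: best/best_p tracking, early return on priority 0
def bLoop (q0 : String) : List String → Option String → Int → String
  | [], best, _ =>
    match best with
    | some b => b
    | none => q0
  | q :: rest, best, bestP =>
    match PySem.Dict.get? bPriority (PySem.Str.lower q) with
    | none => bLoop q0 rest best bestP
    | some p =>
      if p = 0 then q
      else if p < bestP then bLoop q0 rest (some q) p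
      else bLoop q0 rest best bestP

def get_default_quantization_py_alt (quantizations : List String) : String :=
  match quantizations with
  | [] => "Q4_K_M"
  | q0 :: rest => bLoop q0 (q0 :: rest) none 4

-- ===== PRECONDITION & SPEC =====
def Spec_get_default_quantization_py (quantizations : List String) (out : String) : Prop := out = get_default_quantization_py_alt quantizations
instance (quantizations : List String) (out : String) : Decidable (Spec_get_default_quantization_py quantizations out) := by unfold Spec_get_default_quantization_py; infer_instance

-- ===== CLAIM (what is proved, stated in full; the proofs are below) =====
def Claim_equal_get_default_quantization_py : Prop := ∀ (quantizations : List String), Dom_get_default_quantization_py quantizations → Spec_get_default_quantization_py quantizations (get_default_quantization_py quantizations)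

-- ===== LEMMAS AND PROOFS =====

-- first element of qs whose lowercase equals the (already lowercased) key k
def firstWith : List String → String → Option String
  | [], _ => none
  | q :: rest, k => if PySem.Str.lower q = k then some q else firstWith rest k

theorem aInner_eq_firstWith (qs : List String) (pref : String) :
    aInner qs pref = firstWith qs (PySem.Str.lower pref) := by
  induction qs with
  | nil => rfl
  | cons q rest ih => simp [aInner, firstWith, ih]

-- the four partial cascades describing B's state after having seen best priority 1/2/3
def casc1 (qs : List String) (b : String) : String :=
  match firstWith qs "q4_k_m" with
  | some q => q
  | none => b

def casc2 (qs : List String) (b : String) : String :=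
  match firstWith qs "q4_k_m" with
  | some q => q
  | none =>
    match firstWith qs "q4_0" with
    | some q => q
    | none => b

def casc3 (qs : List String) (b : String) : String :=
  match firstWith qs "q4_k_m" with
  | some q => q
  | none =>
    match firstWith qs "q4_0" with
    | some q => q
    | none =>
      match firstWith qs "q5_k_m" with
      | some q => q
      | none => b

def cascade (qs : List String) (q0 : String) : String :=
  match firstWith qs "q4_k_m" with
  | some q => q
  | none =>
    match firstWith qs "q4_0" with
    | some q => q
    | none =>
      match firstWith qs "q5_k_m" with
      | some q => q
      | none =>
        match firstWith qs "q8_0" with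
        | some q => q
        | none => q0

theorem bPriority_get_none (s : String) (h0 : s ≠ "q4_k_m") (h1 : s ≠ "q4_0")
    (h2 : s ≠ "q5_k_m") (h3 : s ≠ "q8_0") :
    PySem.Dict.get? bPriority s = none := by
  have e0 : ("q4_k_m" == s) = false := by simp [h0.symm]
  have e1 : ("q4_0" == s) = false := by simp [h1.symm]
  have e2 : ("q5_k_m" == s) = false := by simp [h2.symm]
  have e3 : ("q8_0" == s) = false := by simp [h3.symm]
  have hit : bPriority.items = [("q4_k_m", (0 : Int)), ("q4_0", 1), ("q5_k_m", 2), ("q8_0", 3)] := by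
    decide
  simp [PySem.Dict.get?, hit, List.find?, e0, e1, e2, e3]

theorem bLoop_inv (q0 : String) (qs : List String) :
    (∀ b, bLoop q0 qs (some b) 1 = casc1 qs b) ∧
    (∀ b, bLoop q0 qs (some b) 2 = casc2 qs b) ∧
    (∀ b, bLoop q0 qs (some b) 3 = casc3 qs b) ∧
    bLoop q0 qs none 4 = cascade qs q0 := by
  have g0 : PySem.Dict.get? bPriority "q4_k_m" = some 0 := by decide
  have g1 : PySem.Dict.get? bPriority "q4_0" = some 1 := by decide
  have g2 : PySem.Dict.get? bPriority "q5_k_m" = some 2 := by decide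
  have g3 : PySem.Dict.get? bPriority "q8_0" = some 3 := by decide
  induction qs with
  | nil => simp [bLoop, casc1, casc2, casc3, cascade, firstWith]
  | cons q rest ih =>
    obtain ⟨ih1, ih2, ih3, ih4⟩ := ih
    by_cases h0 : PySem.Str.lower q = "q4_k_m"
    · simp [bLoop, casc1, casc2, casc3, cascade, firstWith, h0, g0]
    · by_cases h1 : PySem.Str.lower q = "q4_0"
      · simp [bLoop, casc1, casc2, casc3, cascade, firstWith, h1, g1, ih1]
      · by_cases h2 : PySem.Str.lower q = "q5_k_m"
        · simp [bLoop, casc1, casc2, casc3, cascade, firstWith, h2, g2, ih1, ih2]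
        · by_cases h3 : PySem.Str.lower q = "q8_0"
          · simp [bLoop, casc1, casc2, casc3, cascade, firstWith, h3, g3, ih1, ih2, ih3]
          · simp [bLoop, casc1, casc2, casc3, cascade, firstWith, h0, h1, h2, h3,
              bPriority_get_none _ h0 h1 h2 h3, ih1, ih2, ih3, ih4]

theorem aOuter_eq_cascade (qs : List String) (q0 : String) :
    (match aOuter ["Q4_K_M", "q4_K_M", "Q4_0", "q4_0", "Q5_K_M", "q5_K_M", "Q8_0", "q8_0"] qs with
     | some q => q
     | none => q0) = cascade qs q0 := by
  have l0 : PySem.Str.lower "Q4_K_M" = "q4_k_m" := by decide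
  have l0' : PySem.Str.lower "q4_K_M" = "q4_k_m" := by decide
  have l1 : PySem.Str.lower "Q4_0" = "q4_0" := by decide
  have l1' : PySem.Str.lower "q4_0" = "q4_0" := by decide
  have l2 : PySem.Str.lower "Q5_K_M" = "q5_k_m" := by decide
  have l2' : PySem.Str.lower "q5_K_M" = "q5_k_m" := by decide
  have l3 : PySem.Str.lower "Q8_0" = "q8_0" := by decide
  have l3' : PySem.Str.lower "q8_0" = "q8_0" := by decide
  simp only [aOuter, aInner_eq_firstWith, l0, l0', l1, l1', l2, l2', l3, l3', cascade]
  cases firstWith qs "q4_k_m" <;> cases firstWith qs "q4_0" <;>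
    cases firstWith qs "q5_k_m" <;> cases firstWith qs "q8_0" <;> rfl

-- ===== VERDICT (by name: the statement is the Claim_ definition above) =====
theorem get_default_quantization_py_spec : Claim_equal_get_default_quantization_py := by
  intro qs _
  unfold Spec_get_default_quantization_py
  cases qs with
  | nil => rfl
  | cons q0 rest =>
    rw [show get_default_quantization_py (q0 :: rest) =
          (match aOuter ["Q4_K_M", "q4_K_M", "Q4_0", "q4_0", "Q5_K_M", "q5_K_M", "Q8_0", "q8_0"]
              (q0 :: rest) with
           | some q => q
           | none => q0) from rfl,
        show get_default_quantization_py_alt (q0 :: rest) = bLoop q0 (q0 :: rest) none 4 from rfl,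
        (bLoop_inv q0 (q0 :: rest)).2.2.2, aOuter_eq_cascade]
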